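-- pv_equiv track=rewrite | github.com/kimphysicsman/nbcamp-algorithm-220726 | week_5/01_catch_me.py | catch_me
-- ===== SOURCE A (Python) =====
-- from collections import deque
--
-- def catch_me(cony_loc, brown_loc):
--     count = 0
--
--     queue = deque()
--     queue.append(brown_loc)
--
--     while True:
--         # 하루 추가
--         count += 1
--
--         # 코니 위치
--         cony_loc += count
--
--         # 브라운이 위치를 저장할 곳
--         visited = dict()
--
--         # 브라운 위치 저장
--         len_queue = len(queue)
--         for _ in range(len_queue):
--             # 전날 브라운 위치에 따른 다음 위치 저장
--             pre_brown_loc = queue.popleft()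
--
--             brown_loc = pre_brown_loc - 1
--             if 0 <= brown_loc <= 200000 and brown_loc not in visited:
--                 queue.append(brown_loc)
--                 visited[brown_loc] = 1
--
--             brown_loc = pre_brown_loc + 1
--             if 0 <= brown_loc <= 200000 and brown_loc not in visited:
--                 queue.append(brown_loc)
--                 visited[brown_loc] = 1
--
--             brown_loc = pre_brown_loc * 2
--             if 0 <= brown_loc <= 200000 and brown_loc not in visited:
--                 queue.append(brown_loc)
--                 visited[brown_loc] = 1
--
--         if not 0 <= cony_loc <= 200000:
--             break
--
--         if cony_loc in visited:
--             return count
--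
--     return -1
-- ===== SOURCE B (Python) =====
-- def catch_me(cony_loc, brown_loc):
--     # Layered BFS: each position/parity state is expanded at most once overall,
--     # instead of re-expanding the whole frontier every day.
--     LIMIT = 200000
--     seen_even = {brown_loc}
--     seen_odd = set()
--     frontier = [brown_loc]  # states newly reached on the current day
--     t = 0
--     pos = cony_loc
--     while True:
--         t += 1
--         pos += t
--         seen = seen_odd if t % 2 else seen_even
--         new = []
--         for p in frontier:
--             for q in (p - 1, p + 1, 2 * p):
--                 if 0 <= q <= LIMIT and q not in seen:
--                     seen.add(q)
--                     new.append(q)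
--         frontier = new
--         if not 0 <= pos <= LIMIT:
--             return -1
--         if pos in seen:
--             return t
-- ===== Notes on version B (the rewrite author's own statement) =====
-- stated objective: faster
-- what changed: A rebuilds the whole reachable frontier from scratch every day (re-expanding every reachable position each day); B runs one global layered BFS over (position, day-parity) states, expanding each state at most once overall, and tests Cony's quadratic position against the cumulative parity set.
import Mathlib
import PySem

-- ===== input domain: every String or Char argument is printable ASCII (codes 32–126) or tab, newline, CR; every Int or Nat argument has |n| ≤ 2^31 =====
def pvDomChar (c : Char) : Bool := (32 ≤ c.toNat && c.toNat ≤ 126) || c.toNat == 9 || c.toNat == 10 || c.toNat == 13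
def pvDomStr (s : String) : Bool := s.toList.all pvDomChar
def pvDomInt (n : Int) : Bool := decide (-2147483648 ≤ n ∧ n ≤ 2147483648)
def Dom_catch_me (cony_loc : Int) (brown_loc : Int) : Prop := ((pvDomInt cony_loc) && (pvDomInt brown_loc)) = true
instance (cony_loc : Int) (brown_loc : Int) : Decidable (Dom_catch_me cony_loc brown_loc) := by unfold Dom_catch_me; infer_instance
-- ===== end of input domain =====

-- B replaces A's per-day re-expansion of the whole reachable frontier by a layered BFS that
-- expands each (position, day-parity) state at most once (objective: faster, asymptotic).

-- ===== PORT A =====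
-- One `if 0 <= brown_loc <= 200000 and brown_loc not in visited:` block of A's inner loop
-- (the same code appears three times in A, for pre-1, pre+1, pre*2).
-- `visited` is only ever inserted into and membership-tested (never iterated), and the deque
-- only appended to, so a hash map and a push-array model the Python dict/deque appends exactly.
def pvTryA (st : Array Int × Std.HashMap Int Int) (q : Int) : Array Int × Std.HashMap Int Int :=
  if 0 ≤ q ∧ q ≤ 200000 ∧ st.2.contains q = false then (st.1.push q, st.2.insert q 1) else st

-- A's `for _ in range(len_queue): pre = queue.popleft(); …` day loop: exactly the original
-- len(queue) elements are popped from the front while appends go behind them, so it is the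
-- structural recursion on the list of original elements, with the appended ones in `acc`.
def pvDayA : List Int → Array Int × Std.HashMap Int Int → Array Int × Std.HashMap Int Int
  | [], st => st
  | pre :: rest, st => pvDayA rest (pvTryA (pvTryA (pvTryA st (pre - 1)) (pre + 1)) (pre * 2))

-- A's `while True:` loop; `count` starts at 0 and only grows, kept as a Nat.
-- (cony_loc += count; build the day's visited/queue; break out of range; test membership)
def pvLoopA (count : Nat) (cony : Int) (queue : List Int) : Int :=
  if ¬(0 ≤ cony + ((count : Int) + 1) ∧ cony + ((count : Int) + 1) ≤ 200000) then -1
  else if (pvDayA queue (#[], ∅)).2.contains (cony + ((count : Int) + 1)) then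
    (count : Int) + 1
  else pvLoopA (count + 1) (cony + ((count : Int) + 1)) (pvDayA queue (#[], ∅)).1.toList
termination_by (200001 - cony).toNat
decreasing_by simp only [not_not] at *; omega

def catch_me (cony_loc : Int) (brown_loc : Int) : Int :=
  pvLoopA 0 cony_loc [brown_loc]

-- ===== PORT B =====
-- body of B's `for q in (p - 1, p + 1, 2 * p):` loop
-- B's seen sets are likewise only inserted into and membership-tested, `new` only appended to.
def pvTryB (st : Array Int × Std.HashSet Int) (q : Int) : Array Int × Std.HashSet Int :=
  if 0 ≤ q ∧ q ≤ 200000 ∧ st.2.contains q = false then (st.1.push q, st.2.insert q) else st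

-- B's `for p in frontier:` day expansion, starting from `new = []` and the selected seen set
def pvDayB (frontier : List Int) (seen : Std.HashSet Int) : Array Int × Std.HashSet Int :=
  frontier.foldl (fun st p => [p - 1, p + 1, 2 * p].foldl pvTryB st) (#[], seen)

-- B's `while True:` loop (`t` starts at 0 and only grows, kept as a Nat): pick the seen set
-- of the new day's parity, expand the frontier into it, then the same two checks as A.
def pvLoopB (t : Nat) (pos : Int) (seenE seenO : Std.HashSet Int) (frontier : List Int) : Int :=
  if ¬(0 ≤ pos + ((t : Int) + 1) ∧ pos + ((t : Int) + 1) ≤ 200000) then -1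
  else if (pvDayB frontier (if (t + 1) % 2 = 1 then seenO else seenE)).2.contains
      (pos + ((t : Int) + 1)) then (t : Int) + 1
  else if (t + 1) % 2 = 1 then
    pvLoopB (t + 1) (pos + ((t : Int) + 1)) seenE
      (pvDayB frontier (if (t + 1) % 2 = 1 then seenO else seenE)).2
      (pvDayB frontier (if (t + 1) % 2 = 1 then seenO else seenE)).1.toList
  else
    pvLoopB (t + 1) (pos + ((t : Int) + 1))
      (pvDayB frontier (if (t + 1) % 2 = 1 then seenO else seenE)).2 seenO
      (pvDayB frontier (if (t + 1) % 2 = 1 then seenO else seenE)).1.toList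
termination_by (200001 - pos).toNat
decreasing_by all_goals simp only [not_not] at *; omega

def catch_me_alt (cony_loc : Int) (brown_loc : Int) : Int :=
  pvLoopB 0 cony_loc ((∅ : Std.HashSet Int).insert brown_loc) ∅ [brown_loc]

-- ===== PRECONDITION & SPEC =====
def Spec_catch_me (cony_loc : Int) (brown_loc : Int) (out : Int) : Prop := out = catch_me_alt cony_loc brown_loc
instance (cony_loc : Int) (brown_loc : Int) (out : Int) : Decidable (Spec_catch_me cony_loc brown_loc out) := by unfold Spec_catch_me; infer_instance

-- ===== CLAIM (what is proved, stated in full; the proofs are below) =====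
def Claim_equal_catch_me : Prop := ∀ (cony_loc : Int) (brown_loc : Int), Dom_catch_me cony_loc brown_loc → Spec_catch_me cony_loc brown_loc (catch_me cony_loc brown_loc)

-- ===== LEMMAS AND PROOFS =====

-- x is a position Brown can move to in one day from p (and is on the board)
def pvNbr (p x : Int) : Prop := (x = p - 1 ∨ x = p + 1 ∨ x = p * 2) ∧ 0 ≤ x ∧ x ≤ 200000

-- positions Brown can occupy after exactly t days, starting from b
def pvReach (b : Int) : Nat → Int → Prop
  | 0 => fun x => x = b
  | t + 1 => fun x => ∃ p, pvReach b t p ∧ pvNbr p x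

-- positions reached on some day e ≤ t with e ≡ par (mod 2)
def pvCum (b : Int) (par t : Nat) (x : Int) : Prop := ∃ e, e ≤ t ∧ e % 2 = par ∧ pvReach b e x

-- positions already reached on an earlier day of t's parity
def pvPrior (b : Int) (t : Nat) (x : Int) : Prop := ∃ e, e + 2 ≤ t ∧ e % 2 = t % 2 ∧ pvReach b e x

lemma pvReach_range {b : Int} {t : Nat} {x : Int} (h : pvReach b (t + 1) x) :
    0 ≤ x ∧ x ≤ 200000 := by
  obtain ⟨p, -, -, hr⟩ := h; exact hr

lemma pvReach_add_two {b : Int} {t : Nat} {x : Int} (ht : 1 ≤ t) (h : pvReach b t x) :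
    pvReach b (t + 2) x := by
  obtain ⟨s, rfl⟩ : ∃ s, t = s + 1 := ⟨t - 1, by omega⟩
  have hrng := pvReach_range h
  by_cases hx : x = 0
  · subst hx
    have h1 : pvReach b (s + 2) 0 := ⟨0, h, Or.inr (Or.inr (by norm_num)), le_refl 0, by norm_num⟩
    exact ⟨0, h1, Or.inr (Or.inr (by norm_num)), le_refl 0, by norm_num⟩
  · have h1 : pvReach b (s + 2) (x - 1) := ⟨x, h, Or.inl rfl, by omega, by omega⟩
    exact ⟨x - 1, h1, Or.inr (Or.inl (by ring)), hrng.1, hrng.2⟩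

lemma pvReach_two_self {b : Int} (h0 : 0 ≤ b) (h1 : b ≤ 200000) : pvReach b 2 b := by
  by_cases hb : b = 0
  · subst hb
    exact ⟨0, ⟨0, rfl, Or.inr (Or.inr (by ring)), le_refl 0, by norm_num⟩,
      Or.inr (Or.inr (by ring)), le_refl 0, by norm_num⟩
  · exact ⟨b - 1, ⟨b, rfl, Or.inl rfl, by omega, by omega⟩, Or.inr (Or.inl (by ring)), h0, h1⟩

lemma pvReach_add_two_mul {b : Int} {t : Nat} {x : Int} (ht : 1 ≤ t) (h : pvReach b t x) :
    ∀ k, pvReach b (t + 2 * k) x := by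
  intro k
  induction k with
  | zero => simpa using h
  | succ k ih =>
      have := pvReach_add_two (t := t + 2 * k) (by omega) ih
      have he : t + 2 * (k + 1) = t + 2 * k + 2 := by ring
      rw [he]; exact this

lemma pvReach_mono {b : Int} {e t : Nat} {x : Int} (hle : e ≤ t) (hpar : e % 2 = t % 2)
    (he : 1 ≤ e) (h : pvReach b e x) : pvReach b t x := by
  obtain ⟨k, rfl⟩ : ∃ k, t = e + 2 * k := ⟨(t - e) / 2, by omega⟩
  exact pvReach_add_two_mul he h k

lemma pvCum_iff_reach {b : Int} {t : Nat} {pos : Int} (h0 : 0 ≤ pos) (h1 : pos ≤ 200000) :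
    pvCum b (t % 2) t pos ↔ pvReach b t pos := by
  constructor
  · rintro ⟨e, hle, hpar, hr⟩
    by_cases he : 1 ≤ e
    · exact pvReach_mono hle hpar he hr
    · interval_cases e
      · -- e = 0 : pos = b, and t is even
        have hb : pos = b := hr
        subst hb
        rcases Nat.eq_zero_or_pos t with h | h
        · subst h; exact hr
        · have h2 : 2 ≤ t := by omega
          exact pvReach_mono h2 (by omega) (by norm_num) (pvReach_two_self h0 h1)
  · intro h; exact ⟨t, le_refl t, rfl, h⟩

-- the key step: everything reachable on day t+1 is a neighbour of the day-t frontier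
-- (positions reached at t for the first time at this parity) or already seen at t+1's parity
lemma pvReach_succ_split {b : Int} {t : Nat} {x : Int} (h : pvReach b (t + 1) x) :
    (∃ p, (pvReach b t p ∧ ¬ pvPrior b t p) ∧ pvNbr p x) ∨ pvCum b ((t + 1) % 2) t x := by
  obtain ⟨p, hp, hn⟩ := h
  by_cases hpr : pvPrior b t p
  · obtain ⟨e, he2, hpar, hre⟩ := hpr
    exact Or.inr ⟨e + 1, by omega, by omega, p, hre, hn⟩
  · exact Or.inl ⟨p, ⟨hp, hpr⟩, hn⟩

-- ---- generic characterisation of one day's expansion (shared by both ports) ----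

-- `try st q` = "add q to the day's output unless off-board or already seen";
-- C st x = "x is seen in st", M st x = "x is in st's output list".
lemma pvFold_contains {σ : Type} (tryf : σ → Int → σ) (C : σ → Int → Prop)
    (hC : ∀ st q x, C (tryf st q) x ↔ (C st x ∨ (x = q ∧ 0 ≤ x ∧ x ≤ 200000))) :
    ∀ (qs : List Int) (st : σ) (x : Int),
      C (qs.foldl tryf st) x ↔ (C st x ∨ (x ∈ qs ∧ 0 ≤ x ∧ x ≤ 200000)) := by
  intro qs
  induction qs with
  | nil => intro st x; simp
  | cons q rest ih =>
      intro st x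
      rw [List.foldl_cons, ih, hC]
      simp only [List.mem_cons]
      tauto

lemma pvFold_mem {σ : Type} (tryf : σ → Int → σ) (C M : σ → Int → Prop)
    (hC : ∀ st q x, C (tryf st q) x ↔ (C st x ∨ (x = q ∧ 0 ≤ x ∧ x ≤ 200000)))
    (hM : ∀ st q x, M (tryf st q) x ↔ (M st x ∨ (x = q ∧ (0 ≤ x ∧ x ≤ 200000) ∧ ¬ C st x))) :
    ∀ (qs : List Int) (st : σ) (x : Int),
      M (qs.foldl tryf st) x ↔ (M st x ∨ (x ∈ qs ∧ (0 ≤ x ∧ x ≤ 200000) ∧ ¬ C st x)) := by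
  intro qs
  induction qs with
  | nil => intro st x; simp
  | cons q rest ih =>
      intro st x
      rw [List.foldl_cons, ih, hM, hC]
      simp only [List.mem_cons]
      tauto

lemma pvNbr_iff (p x : Int) (l : List Int)
    (hl : ∀ y, y ∈ l ↔ (y = p - 1 ∨ y = p + 1 ∨ y = p * 2)) :
    (x ∈ l ∧ 0 ≤ x ∧ x ≤ 200000) ↔ pvNbr p x := by
  rw [hl, pvNbr]

lemma pvFoldDay_contains {σ : Type} (tryf : σ → Int → σ) (C : σ → Int → Prop) (nb : Int → List Int)
    (hC : ∀ st q x, C (tryf st q) x ↔ (C st x ∨ (x = q ∧ 0 ≤ x ∧ x ≤ 200000)))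
    (hnb : ∀ p y, y ∈ nb p ↔ (y = p - 1 ∨ y = p + 1 ∨ y = p * 2)) :
    ∀ (fr : List Int) (st : σ) (x : Int),
      C (fr.foldl (fun st p => (nb p).foldl tryf st) st) x ↔ (C st x ∨ ∃ p ∈ fr, pvNbr p x) := by
  intro fr
  induction fr with
  | nil => intro st x; simp
  | cons p rest ih =>
      intro st x
      rw [List.foldl_cons, ih, pvFold_contains tryf C hC]
      simp only [List.mem_cons]
      constructor
      · rintro ((hc | hn) | ⟨q, hq, hn⟩)
        · exact Or.inl hc
        · exact Or.inr ⟨p, Or.inl rfl, (pvNbr_iff p x (nb p) (hnb p)).mp hn⟩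
        · exact Or.inr ⟨q, Or.inr hq, hn⟩
      · rintro (hc | ⟨q, (rfl | hq), hn⟩)
        · exact Or.inl (Or.inl hc)
        · exact Or.inl (Or.inr ((pvNbr_iff q x (nb q) (hnb q)).mpr hn))
        · exact Or.inr ⟨q, hq, hn⟩

lemma pvFoldDay_mem {σ : Type} (tryf : σ → Int → σ) (C M : σ → Int → Prop) (nb : Int → List Int)
    (hC : ∀ st q x, C (tryf st q) x ↔ (C st x ∨ (x = q ∧ 0 ≤ x ∧ x ≤ 200000)))
    (hM : ∀ st q x, M (tryf st q) x ↔ (M st x ∨ (x = q ∧ (0 ≤ x ∧ x ≤ 200000) ∧ ¬ C st x)))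
    (hnb : ∀ p y, y ∈ nb p ↔ (y = p - 1 ∨ y = p + 1 ∨ y = p * 2)) :
    ∀ (fr : List Int) (st : σ) (x : Int),
      M (fr.foldl (fun st p => (nb p).foldl tryf st) st) x ↔
        (M st x ∨ ((∃ p ∈ fr, pvNbr p x) ∧ ¬ C st x)) := by
  intro fr
  induction fr with
  | nil => intro st x; simp
  | cons p rest ih =>
      intro st x
      rw [List.foldl_cons, ih, pvFold_mem tryf C M hC hM, pvFold_contains tryf C hC]
      simp only [List.mem_cons]
      constructor
      · rintro ((hm | ⟨hn, hr, hc⟩) | ⟨⟨q, hq, hn⟩, hc⟩)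
        · exact Or.inl hm
        · exact Or.inr ⟨⟨p, Or.inl rfl, (pvNbr_iff p x (nb p) (hnb p)).mp ⟨hn, hr⟩⟩, hc⟩
        · exact Or.inr ⟨⟨q, Or.inr hq, hn⟩, fun h => hc (Or.inl h)⟩
      · rintro (hm | ⟨⟨q, (rfl | hq), hn⟩, hc⟩)
        · exact Or.inl (Or.inl hm)
        · refine Or.inl (Or.inr ?_)
          have := (pvNbr_iff q x (nb q) (hnb q)).mpr hn
          exact ⟨this.1, this.2, hc⟩
        · by_cases hn2 : x ∈ nb p ∧ 0 ≤ x ∧ x ≤ 200000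
          · exact Or.inl (Or.inr ⟨hn2.1, hn2.2, hc⟩)
          · exact Or.inr ⟨⟨q, hq, hn⟩, fun h => (h.elim (fun hc2 => hc hc2) (fun h2 => hn2 h2))⟩

-- ---- instantiation for A's day (dict `visited`, deque output) ----

lemma pvTryA_contains (st : Array Int × Std.HashMap Int Int) (q x : Int) :
    (pvTryA st q).2.contains x = true ↔
      (st.2.contains x = true ∨ (x = q ∧ 0 ≤ x ∧ x ≤ 200000)) := by
  unfold pvTryA
  split_ifs with h
  · simp only [Std.HashMap.contains_insert, Bool.or_eq_true, beq_iff_eq]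
    constructor
    · rintro (h1 | hc)
      · exact Or.inr ⟨h1.symm, h1 ▸ h.1, h1 ▸ h.2.1⟩
      · exact Or.inl hc
    · rintro (hc | ⟨rfl, -, -⟩)
      · exact Or.inr hc
      · exact Or.inl rfl
  · constructor
    · exact Or.inl
    · rintro (hc | ⟨rfl, hx0, hx1⟩)
      · exact hc
      · rcases Bool.eq_false_or_eq_true (st.2.contains x) with ht | hf
        · exact ht
        · exact absurd ⟨hx0, hx1, hf⟩ h

lemma pvTryA_mem (st : Array Int × Std.HashMap Int Int) (q x : Int) :
    x ∈ (pvTryA st q).1 ↔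
      (x ∈ st.1 ∨ (x = q ∧ (0 ≤ x ∧ x ≤ 200000) ∧ ¬ st.2.contains x = true)) := by
  unfold pvTryA
  split_ifs with h
  · simp only [Array.mem_push]
    constructor
    · rintro (hm | rfl)
      · exact Or.inl hm
      · exact Or.inr ⟨rfl, ⟨h.1, h.2.1⟩, by simp [h.2.2]⟩
    · rintro (hm | ⟨rfl, -, -⟩)
      · exact Or.inl hm
      · exact Or.inr rfl
  · constructor
    · exact Or.inl
    · rintro (hm | ⟨rfl, ⟨hx0, hx1⟩, hc⟩)
      · exact hm
      · exact absurd ⟨hx0, hx1, by simpa using hc⟩ h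

lemma pvDayA_eq_foldl (qs : List Int) : ∀ (st : Array Int × Std.HashMap Int Int),
    pvDayA qs st = qs.foldl (fun st p => [p - 1, p + 1, p * 2].foldl pvTryA st) st := by
  induction qs with
  | nil => intro st; rfl
  | cons p rest ih => intro st; rw [pvDayA, ih, List.foldl_cons]; rfl

lemma pvDayA_contains (qs : List Int) (st : Array Int × Std.HashMap Int Int) (x : Int) :
    (pvDayA qs st).2.contains x = true ↔
      (st.2.contains x = true ∨ ∃ p ∈ qs, pvNbr p x) := by
  rw [pvDayA_eq_foldl]
  exact pvFoldDay_contains pvTryA (fun st x => st.2.contains x = true) _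
    pvTryA_contains (fun p y => by simp) qs st x

lemma pvDayA_mem (qs : List Int) (st : Array Int × Std.HashMap Int Int) (x : Int) :
    x ∈ (pvDayA qs st).1 ↔
      (x ∈ st.1 ∨ ((∃ p ∈ qs, pvNbr p x) ∧ ¬ st.2.contains x = true)) := by
  rw [pvDayA_eq_foldl]
  exact pvFoldDay_mem pvTryA (fun st x => st.2.contains x = true) (fun st x => x ∈ st.1) _
    pvTryA_contains pvTryA_mem (fun p y => by simp) qs st x

-- ---- instantiation for B's day (seen set of the day's parity, `new` list) ----

lemma pvTryB_contains (st : Array Int × Std.HashSet Int) (q x : Int) :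
    (pvTryB st q).2.contains x = true ↔
      (st.2.contains x = true ∨ (x = q ∧ 0 ≤ x ∧ x ≤ 200000)) := by
  unfold pvTryB
  split_ifs with h
  · simp only [Std.HashSet.contains_insert, Bool.or_eq_true, beq_iff_eq]
    constructor
    · rintro (h1 | hc)
      · exact Or.inr ⟨h1.symm, h1 ▸ h.1, h1 ▸ h.2.1⟩
      · exact Or.inl hc
    · rintro (hc | ⟨rfl, -, -⟩)
      · exact Or.inr hc
      · exact Or.inl rfl
  · constructor
    · exact Or.inl
    · rintro (hc | ⟨rfl, hx0, hx1⟩)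
      · exact hc
      · rcases Bool.eq_false_or_eq_true (st.2.contains x) with ht | hf
        · exact ht
        · exact absurd ⟨hx0, hx1, hf⟩ h

lemma pvTryB_mem (st : Array Int × Std.HashSet Int) (q x : Int) :
    x ∈ (pvTryB st q).1 ↔
      (x ∈ st.1 ∨ (x = q ∧ (0 ≤ x ∧ x ≤ 200000) ∧ ¬ st.2.contains x = true)) := by
  unfold pvTryB
  split_ifs with h
  · simp only [Array.mem_push]
    constructor
    · rintro (hm | rfl)
      · exact Or.inl hm
      · exact Or.inr ⟨rfl, ⟨h.1, h.2.1⟩, by simp [h.2.2]⟩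
    · rintro (hm | ⟨rfl, -, -⟩)
      · exact Or.inl hm
      · exact Or.inr rfl
  · constructor
    · exact Or.inl
    · rintro (hm | ⟨rfl, ⟨hx0, hx1⟩, hc⟩)
      · exact hm
      · exact absurd ⟨hx0, hx1, by simpa using hc⟩ h

lemma pvDayB_contains (fr : List Int) (seen : Std.HashSet Int) (x : Int) :
    (pvDayB fr seen).2.contains x = true ↔
      (seen.contains x = true ∨ ∃ p ∈ fr, pvNbr p x) := by
  unfold pvDayB
  exact pvFoldDay_contains pvTryB (fun st x => st.2.contains x = true)
    (fun p => [p - 1, p + 1, 2 * p])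
    pvTryB_contains (fun p y => by simp only [List.mem_cons, List.not_mem_nil, or_false]; omega) fr (#[], seen) x

lemma pvDayB_mem (fr : List Int) (seen : Std.HashSet Int) (x : Int) :
    x ∈ (pvDayB fr seen).1 ↔ ((∃ p ∈ fr, pvNbr p x) ∧ ¬ seen.contains x = true) := by
  unfold pvDayB
  have := pvFoldDay_mem pvTryB (fun st x => st.2.contains x = true) (fun st x => x ∈ st.1)
    (fun p => [p - 1, p + 1, 2 * p])
    pvTryB_contains pvTryB_mem (fun p y => by simp only [List.mem_cons, List.not_mem_nil, or_false]; omega) fr (#[], seen) x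
  simpa using this

-- ---- the day-level consequences of the loop invariants ----

lemma pvReach_succ_iff (b : Int) (t : Nat) (x : Int) :
    pvReach b (t + 1) x ↔ ∃ p, pvReach b t p ∧ pvNbr p x := Iff.rfl

lemma pvCum_succ_ne {b : Int} {par t : Nat} (h : (t + 1) % 2 ≠ par) (x : Int) :
    pvCum b par (t + 1) x ↔ pvCum b par t x := by
  constructor
  · rintro ⟨e, he, hp, hr⟩; exact ⟨e, by omega, hp, hr⟩
  · rintro ⟨e, he, hp, hr⟩; exact ⟨e, by omega, hp, hr⟩

lemma pvPrior_succ_iff_cum {b : Int} {t : Nat} (x : Int) :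
    pvPrior b (t + 1) x ↔ pvCum b ((t + 1) % 2) t x := by
  constructor
  · rintro ⟨e, he, hp, hr⟩; exact ⟨e, by omega, hp, hr⟩
  · rintro ⟨e, he, hp, hr⟩; exact ⟨e, by omega, hp, hr⟩

lemma pvDayA_contains_reach {b : Int} {t : Nat} {queue : List Int}
    (hq : ∀ x, x ∈ queue ↔ pvReach b t x) (x : Int) :
    (pvDayA queue (#[], ∅)).2.contains x = true ↔ pvReach b (t + 1) x := by
  rw [pvDayA_contains]
  simp only [Std.HashMap.contains_empty, Bool.false_eq_true, false_or]
  constructor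
  · rintro ⟨p, hp, hn⟩; exact (pvReach_succ_iff b t x).mpr ⟨p, (hq p).mp hp, hn⟩
  · intro h
    obtain ⟨p, hp, hn⟩ := (pvReach_succ_iff b t x).mp h
    exact ⟨p, (hq p).mpr hp, hn⟩

lemma pvDayA_mem_reach {b : Int} {t : Nat} {queue : List Int}
    (hq : ∀ x, x ∈ queue ↔ pvReach b t x) (x : Int) :
    x ∈ (pvDayA queue (#[], ∅)).1 ↔ pvReach b (t + 1) x := by
  rw [pvDayA_mem]
  simp only [Array.mem_empty_iff, false_or, Std.HashMap.contains_empty, Bool.false_eq_true,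
    not_false_iff, and_true]
  constructor
  · rintro ⟨p, hp, hn⟩; exact (pvReach_succ_iff b t x).mpr ⟨p, (hq p).mp hp, hn⟩
  · intro h
    obtain ⟨p, hp, hn⟩ := (pvReach_succ_iff b t x).mp h
    exact ⟨p, (hq p).mpr hp, hn⟩

lemma pvDayB_contains_cum {b : Int} {t : Nat} {seen : Std.HashSet Int} {frontier : List Int}
    (hsel : ∀ x, seen.contains x = true ↔ pvCum b ((t + 1) % 2) t x)
    (hF : ∀ x, x ∈ frontier ↔ (pvReach b t x ∧ ¬ pvPrior b t x)) (x : Int) :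
    (pvDayB frontier seen).2.contains x = true ↔ pvCum b ((t + 1) % 2) (t + 1) x := by
  rw [pvDayB_contains]
  constructor
  · rintro (hc | ⟨p, hp, hn⟩)
    · obtain ⟨e, he, hp2, hr⟩ := (hsel x).mp hc
      exact ⟨e, by omega, hp2, hr⟩
    · exact ⟨t + 1, le_refl _, rfl, (pvReach_succ_iff b t x).mpr ⟨p, ((hF p).mp hp).1, hn⟩⟩
  · rintro ⟨e, he, hp2, hr⟩
    by_cases het : e = t + 1
    · subst het
      rcases pvReach_succ_split hr with ⟨p, hpp, hn⟩ | hc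
      · exact Or.inr ⟨p, (hF p).mpr hpp, hn⟩
      · exact Or.inl ((hsel x).mpr hc)
    · exact Or.inl ((hsel x).mpr ⟨e, by omega, hp2, hr⟩)

lemma pvDayB_mem_front {b : Int} {t : Nat} {seen : Std.HashSet Int} {frontier : List Int}
    (hsel : ∀ x, seen.contains x = true ↔ pvCum b ((t + 1) % 2) t x)
    (hF : ∀ x, x ∈ frontier ↔ (pvReach b t x ∧ ¬ pvPrior b t x)) (x : Int) :
    x ∈ (pvDayB frontier seen).1 ↔ (pvReach b (t + 1) x ∧ ¬ pvPrior b (t + 1) x) := by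
  rw [pvDayB_mem]
  constructor
  · rintro ⟨⟨p, hp, hn⟩, hc⟩
    refine ⟨(pvReach_succ_iff b t x).mpr ⟨p, ((hF p).mp hp).1, hn⟩, fun hpr => hc ?_⟩
    exact (hsel x).mpr ((pvPrior_succ_iff_cum x).mp hpr)
  · rintro ⟨hr, hnp⟩
    rcases pvReach_succ_split hr with ⟨p, hpp, hn⟩ | hc
    · refine ⟨⟨p, (hF p).mpr hpp, hn⟩, fun hc2 => hnp ?_⟩
      exact (pvPrior_succ_iff_cum x).mpr ((hsel x).mp hc2)
    · exact absurd ((pvPrior_succ_iff_cum x).mpr hc) hnp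

-- ---- the lockstep equivalence of the two day loops ----

lemma pvLockstep (b : Int) : ∀ (n t : Nat) (pos : Int) (queue : List Int)
    (seenE seenO : Std.HashSet Int) (frontier : List Int),
    (200001 - pos).toNat ≤ n →
    (∀ x, x ∈ queue ↔ pvReach b t x) →
    (∀ x, seenE.contains x = true ↔ pvCum b 0 t x) →
    (∀ x, seenO.contains x = true ↔ pvCum b 1 t x) →
    (∀ x, x ∈ frontier ↔ (pvReach b t x ∧ ¬ pvPrior b t x)) →
    pvLoopA t pos queue = pvLoopB t pos seenE seenO frontier := by
  intro n
  induction n with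
  | zero =>
      intro t pos queue seenE seenO frontier hn _ _ _ _
      have hout : ¬(0 ≤ pos + ((t : Int) + 1) ∧ pos + ((t : Int) + 1) ≤ 200000) := by omega
      rw [pvLoopA.eq_def, pvLoopB.eq_def, if_pos hout, if_pos hout]
  | succ n ih =>
      intro t pos queue seenE seenO frontier hn hq hE hO hF
      rw [pvLoopA.eq_def, pvLoopB.eq_def]
      by_cases hrng : 0 ≤ pos + ((t : Int) + 1) ∧ pos + ((t : Int) + 1) ≤ 200000
      · rw [if_neg (not_not_intro hrng), if_neg (not_not_intro hrng)]
        have hsel : ∀ x, (if (t + 1) % 2 = 1 then seenO else seenE).contains x = true ↔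
            pvCum b ((t + 1) % 2) t x := by
          intro x
          by_cases hp1 : (t + 1) % 2 = 1
          · rw [if_pos hp1, hp1]; exact hO x
          · rw [if_neg hp1, (by omega : (t + 1) % 2 = 0)]; exact hE x
        have hA := pvDayA_contains_reach hq
        have hB := pvDayB_contains_cum hsel hF
        have hmem : (pvDayA queue (#[], ∅)).2.contains (pos + ((t : Int) + 1)) =
            true ↔
            (pvDayB frontier (if (t + 1) % 2 = 1 then seenO else seenE)).2.contains
              (pos + ((t : Int) + 1)) = true := by
          rw [hA, hB]
          exact (pvCum_iff_reach hrng.1 hrng.2).symm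
        by_cases hm : (pvDayA queue (#[], ∅)).2.contains
            (pos + ((t : Int) + 1)) = true
        · rw [if_pos hm, if_pos (hmem.mp hm)]
        · have hm' := fun h => hm (hmem.mpr h)
          rw [if_neg hm, if_neg hm']
          have hmeas : (200001 - (pos + ((t : Int) + 1))).toNat ≤ n := by omega
          have hq' : ∀ x, x ∈ (pvDayA queue (#[], ∅)).1.toList ↔ pvReach b (t + 1) x :=
            fun x => (Array.mem_toList_iff).trans (pvDayA_mem_reach hq x)
          have hF' : ∀ x,
              x ∈ (pvDayB frontier (if (t + 1) % 2 = 1 then seenO else seenE)).1.toList ↔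
              (pvReach b (t + 1) x ∧ ¬ pvPrior b (t + 1) x) :=
            fun x => (Array.mem_toList_iff).trans (pvDayB_mem_front hsel hF x)
          by_cases hpar : (t + 1) % 2 = 1
          · rw [if_pos hpar]
            refine ih (t + 1) (pos + ((t : Int) + 1)) _ seenE _ _ hmeas hq' ?_ ?_ hF'
            · exact fun x => (hE x).trans (pvCum_succ_ne (by omega) x).symm
            · exact fun x => (hB x).trans (by rw [hpar])
          · rw [if_neg hpar]
            refine ih (t + 1) (pos + ((t : Int) + 1)) _ _ seenO _ hmeas hq' ?_ ?_ hF'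
            · exact fun x => (hB x).trans (by rw [(by omega : (t + 1) % 2 = 0)])
            · exact fun x => (hO x).trans (pvCum_succ_ne (by omega) x).symm
      · rw [if_pos hrng, if_pos hrng]

-- ===== VERDICT (by name: the statement is the Claim_ definition above) =====
theorem catch_me_spec : Claim_equal_catch_me := by
  intro cony_loc brown_loc _
  unfold Spec_catch_me catch_me catch_me_alt
  apply pvLockstep brown_loc ((200001 - cony_loc).toNat) 0
  · exact le_refl _
  · intro x
    simp only [List.mem_singleton]
    exact Iff.rfl
  · intro x
    simp only [Std.HashSet.contains_insert, Std.HashSet.contains_empty, Bool.or_eq_true,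
      beq_iff_eq, Bool.false_eq_true, or_false]
    constructor
    · rintro rfl
      exact ⟨0, le_refl 0, rfl, rfl⟩
    · rintro ⟨e, he, -, hr⟩
      interval_cases e
      exact hr.symm
  · intro x
    simp only [Std.HashSet.contains_empty, Bool.false_eq_true, false_iff]
    rintro ⟨e, he, hp, -⟩
    interval_cases e
    cases hp
  · intro x
    simp only [List.mem_singleton]
    constructor
    · rintro rfl
      exact ⟨rfl, fun ⟨e, he, _, _⟩ => by omega⟩
    · rintro ⟨h, -⟩
      exact h
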